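-- pv_equiv track=rewrite | github.com/gene-git/ssl-mgr | src/ssl_mgr/crypto_base/certinfo_print.py | _sans_format
-- ===== SOURCE A (Python) =====
-- def _sans_format(sans: list[str], max_width: int, leader: str) -> str:
--     """
--     Break up long sans into multiple lines
--     All but first line have leader in front
--     """
--     if not sans:
--         return ''
--
--     san_fmt = ''
--     this_width = 0
--     for item in sans:
--         this_width += len(item)
--         if this_width > max_width:
--             san_fmt += '\n' + leader + item + ', '
--             this_width = 0
--         else:
--             san_fmt += item + ', '
--
--     return san_fmt
-- ===== SOURCE B (Python) =====
-- def _sans_format(sans: list[str], max_width: int, leader: str) -> str: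
--     """Two-pass rewrite: first partition sans into line groups, then format each group."""
--     if not sans:
--         return ''
--
--     groups = [[]]
--     this_width = 0
--     for item in sans:
--         this_width += len(item)
--         if this_width > max_width:
--             groups.append([item])
--             this_width = 0
--         else:
--             groups[-1].append(item)
--
--     pieces = [''.join(it + ', ' for it in groups[0])]
--     for grp in groups[1:]:
--         pieces.append('\n' + leader + ''.join(it + ', ' for it in grp))
--     return ''.join(pieces)
-- ===== Notes on version B (the rewrite author's own statement) =====
-- stated objective: alternative
-- what changed: Replaced A's single fused loop (which appends formatted text and tracks width together) by two separate passes: a grouping pass that partitions sans into line groups using the same width rule, then an assembly pass that joins each group and prefixes newline+leader to every group after the first.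
import Mathlib
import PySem

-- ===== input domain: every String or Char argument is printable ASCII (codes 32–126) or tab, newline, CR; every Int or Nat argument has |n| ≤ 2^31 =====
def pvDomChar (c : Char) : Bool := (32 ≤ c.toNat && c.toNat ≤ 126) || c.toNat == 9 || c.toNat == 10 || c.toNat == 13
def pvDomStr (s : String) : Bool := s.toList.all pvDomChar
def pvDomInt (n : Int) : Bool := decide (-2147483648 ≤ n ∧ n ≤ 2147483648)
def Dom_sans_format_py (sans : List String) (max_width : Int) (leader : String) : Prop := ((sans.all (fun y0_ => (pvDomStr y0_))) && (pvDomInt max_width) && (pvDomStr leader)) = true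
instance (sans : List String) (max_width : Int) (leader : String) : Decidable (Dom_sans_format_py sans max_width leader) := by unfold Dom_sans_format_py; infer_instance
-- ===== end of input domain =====

-- B separates line partitioning (a grouping pass) from string assembly (a formatting pass);
-- objective: alternative decomposition, same cost — equivalence of the return value is what is proved.

-- ===== PORT A =====
-- A's single accumulating loop: state = (san_fmt, this_width)
def sansLoopA (max_width : Int) (leader : String) (st : String × Int) (item : String) : String × Int :=
  let w := st.2 + PySem.Str.len item
  if w > max_width then (st.1 ++ "\n" ++ leader ++ item ++ ", ", 0)
  else (st.1 ++ item ++ ", ", w)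

def sans_format_py (sans : List String) (max_width : Int) (leader : String) : String :=
  if sans = [] then ""
  else (sans.foldl (sansLoopA max_width leader) ("", 0)).1

-- ===== PORT B =====
-- groups[-1].append(item)
def appendLast (gs : List (List String)) (item : String) : List (List String) :=
  match gs with
  | [] => [[item]]
  | [g] => [g ++ [item]]
  | g :: rest => g :: appendLast rest item

-- B's grouping pass: state = (groups, this_width)
def sansGroupStep (max_width : Int) (st : List (List String) × Int) (item : String) : List (List String) × Int :=
  let w := st.2 + PySem.Str.len item
  if w > max_width then (st.1 ++ [[item]], 0)
  else (appendLast st.1 item, w)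

-- ''.join(it + ', ' for it in g)
def renderGroup (g : List String) : String := String.join (g.map (fun it => it ++ ", "))

def sans_format_py_alt (sans : List String) (max_width : Int) (leader : String) : String :=
  if sans = [] then ""
  else
    let groups := (sans.foldl (sansGroupStep max_width) ([[]], 0)).1
    let pieces := renderGroup (groups.headD []) ::
      (groups.drop 1).map (fun g => "\n" ++ leader ++ renderGroup g)
    String.join pieces

-- ===== PRECONDITION & SPEC =====
def Spec_sans_format_py (sans : List String) (max_width : Int) (leader : String) (out : String) : Prop := out = sans_format_py_alt sans max_width leader
instance (sans : List String) (max_width : Int) (leader : String) (out : String) : Decidable (Spec_sans_format_py sans max_width leader out) := by unfold Spec_sans_format_py; infer_instance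

-- ===== CLAIM (what is proved, stated in full; the proofs are below) =====
def Claim_equal_sans_format_py : Prop := ∀ (sans : List String) (max_width : Int) (leader : String), Dom_sans_format_py sans max_width leader → Spec_sans_format_py sans max_width leader (sans_format_py sans max_width leader)

-- ===== LEMMAS AND PROOFS =====

theorem foldl_str_append (l : List String) : ∀ a b : String,
    List.foldl (fun r s => r ++ s) (a ++ b) l = a ++ List.foldl (fun r s => r ++ s) b l := by
  induction l with
  | nil => intro a b; rfl
  | cons t l ih => intro a b; simp only [List.foldl_cons, String.append_assoc, ih]

theorem join_cons (s : String) (l : List String) : String.join (s :: l) = s ++ String.join l := by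
  simp only [String.join, List.foldl_cons]
  rw [show ("" ++ s : String) = s ++ "" by simp, foldl_str_append]

-- the tail pieces of B's assembly
def renderTail (leader : String) (gs : List (List String)) : String :=
  String.join (gs.map (fun g => "\n" ++ leader ++ renderGroup g))

-- B's assembly for a nonempty group list, in recursion-friendly form
def renderNE (leader : String) (gs : List (List String)) : String :=
  renderGroup (gs.headD []) ++ renderTail leader (gs.drop 1)

theorem renderNE_eq_join (leader : String) (gs : List (List String)) :
    String.join (renderGroup (gs.headD []) :: (gs.drop 1).map (fun g => "\n" ++ leader ++ renderGroup g))
      = renderNE leader gs := by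
  simp [renderNE, renderTail, join_cons]

theorem renderGroup_append_singleton (g : List String) (it : String) :
    renderGroup (g ++ [it]) = renderGroup g ++ (it ++ ", ") := by
  induction g with
  | nil => simp [renderGroup, String.join]
  | cons x g ih => simp only [renderGroup, List.map_cons, List.cons_append, join_cons] at *
                   rw [ih]; simp [String.append_assoc]

theorem renderTail_append_singleton (leader : String) (t : List (List String)) (g : List String) :
    renderTail leader (t ++ [g]) = renderTail leader t ++ ("\n" ++ leader ++ renderGroup g) := by
  induction t with
  | nil => simp [renderTail, String.join]
  | cons x t ih => simp only [renderTail, List.map_cons, List.cons_append, join_cons] at *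
                   rw [ih]; simp [String.append_assoc]

theorem renderTail_appendLast (leader it : String) :
    ∀ (gs : List (List String)), gs ≠ [] →
      renderTail leader (appendLast gs it) = renderTail leader gs ++ (it ++ ", ") := by
  intro gs
  induction gs with
  | nil => intro h; exact absurd rfl h
  | cons g t ih =>
    intro _
    match t with
    | [] =>
      simp [appendLast, renderTail, String.join, renderGroup_append_singleton,
            String.append_assoc]
    | g2 :: rest =>
      have : appendLast (g :: g2 :: rest) it = g :: appendLast (g2 :: rest) it := rfl
      rw [this]
      simp only [renderTail, List.map_cons, join_cons] at *
      rw [ih (by simp)]; simp [String.append_assoc]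

theorem appendLast_ne_nil (gs : List (List String)) (it : String) : appendLast gs it ≠ [] := by
  match gs with
  | [] => simp [appendLast]
  | [g] => simp [appendLast]
  | g :: g2 :: rest => simp [appendLast]

theorem renderNE_appendLast (leader it : String) (gs : List (List String)) (h : gs ≠ []) :
    renderNE leader (appendLast gs it) = renderNE leader gs ++ (it ++ ", ") := by
  match gs with
  | [g] =>
    simp [appendLast, renderNE, renderTail, renderGroup_append_singleton, String.append_assoc,
          String.join]
  | g :: g2 :: rest =>
    have : appendLast (g :: g2 :: rest) it = g :: appendLast (g2 :: rest) it := rfl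
    rw [this]
    simp only [renderNE, List.headD_cons, List.drop_one, List.tail_cons]
    rw [renderTail_appendLast leader it (g2 :: rest) (by simp), String.append_assoc]

theorem renderNE_append_new (leader it : String) (gs : List (List String)) (h : gs ≠ []) :
    renderNE leader (gs ++ [[it]]) = renderNE leader gs ++ "\n" ++ leader ++ it ++ ", " := by
  match gs with
  | g :: t =>
    simp only [renderNE, List.cons_append, List.headD_cons, List.drop_one, List.tail_cons]
    rw [renderTail_append_singleton]
    simp [renderGroup, String.join, String.append_assoc]

theorem main_invariant (max_width : Int) (leader : String) :
    ∀ (rest : List String) (gs : List (List String)) (w : Int), gs ≠ [] →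
      (rest.foldl (sansLoopA max_width leader) (renderNE leader gs, w)).1
        = renderNE leader ((rest.foldl (sansGroupStep max_width) (gs, w)).1) := by
  intro rest
  induction rest with
  | nil => intro gs w h; rfl
  | cons item rest ih =>
    intro gs w h
    simp only [List.foldl_cons, sansLoopA, sansGroupStep]
    by_cases hw : w + PySem.Str.len item > max_width
    · rw [if_pos hw, if_pos hw]
      rw [show renderNE leader gs ++ "\n" ++ leader ++ item ++ ", "
            = renderNE leader (gs ++ [[item]]) from (renderNE_append_new leader item gs h).symm]
      exact ih (gs ++ [[item]]) 0 (by simp)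
    · rw [if_neg hw, if_neg hw]
      rw [show renderNE leader gs ++ item ++ ", " = renderNE leader (appendLast gs item) by
            rw [renderNE_appendLast leader item gs h]; simp [String.append_assoc]]
      exact ih (appendLast gs item) (w + PySem.Str.len item) (appendLast_ne_nil gs item)

-- ===== VERDICT (by name: the statement is the Claim_ definition above) =====
theorem sans_format_py_spec : Claim_equal_sans_format_py := by
  intro sans max_width leader _
  unfold Spec_sans_format_py sans_format_py sans_format_py_alt
  by_cases h : sans = []
  · simp [h]
  · rw [if_neg h, if_neg h]
    rw [renderNE_eq_join]
    have h0 : renderNE leader [[]] = "" := by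
      simp [renderNE, renderTail, renderGroup, String.join]
    calc (sans.foldl (sansLoopA max_width leader) ("", 0)).1
        = (sans.foldl (sansLoopA max_width leader) (renderNE leader [[]], 0)).1 := by rw [h0]
      _ = renderNE leader ((sans.foldl (sansGroupStep max_width) ([[]], 0)).1) :=
          main_invariant max_width leader sans [[]] 0 (by simp)
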